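-- pv_equiv track=rewrite | github.com/lwackahg/Fantasy-Project | CascadeProjects/windsurf-project/fantasy-trade-analyzer/pages/98_Best_Auction_Team.py | _roster_feasible
-- ===== SOURCE A (Python) =====
-- def _roster_feasible(elig_sets: list[set[str]], slots: list[str]) -> bool:
--     """Exact feasibility check: can we assign distinct players to each slot?
--
--     Slots are strings in {"G","F","C","Flx"}. "Flx" accepts any of G/F/C.
--     Uses a bitmask DP for speed (roster sizes ~10-16 are fine).
--     """
--
--     n = len(elig_sets)
--     if len(slots) > n:
--         return False
--
--     # Build eligibility mask per slot.
--     slot_masks: list[int] = []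
--     for s in slots:
--         if s == "Flx":
--             allowed = {"G", "F", "C"}
--         else:
--             allowed = {s}
--         mask = 0
--         for i, elig in enumerate(elig_sets):
--             if elig & allowed:
--                 mask |= 1 << i
--         if mask == 0:
--             return False
--         slot_masks.append(mask)
--
--     # Sort slots by restrictedness (fewest eligible players first).
--     slot_masks = sorted(slot_masks, key=lambda m: int(m.bit_count()))
--
--     from functools import lru_cache
--
--     @lru_cache(maxsize=None)
--     def _can_fill(slot_idx: int, used_mask: int) -> bool:
--         if slot_idx >= len(slot_masks):
--             return True
--         available = slot_masks[slot_idx] & (~used_mask)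
--         while available:
--             lsb = available & -available
--             available -= lsb
--             if _can_fill(slot_idx + 1, used_mask | lsb):
--                 return True
--         return False
--
--     return _can_fill(0, 0)
-- ===== SOURCE B (Python) =====
-- def _roster_feasible(elig_sets: list[set[str]], slots: list[str]) -> bool:
--     """Exact feasibility check via Hall's marriage theorem.
--
--     Feasible iff for every set T of distinct slot-eligibility masks, the
--     number of slots demanding masks in T does not exceed the number of
--     players eligible for some mask in T.
--     """
--     n = len(elig_sets)
--     if len(slots) > n:
--         return False
--
--     masks = []
--     for s in slots:
--         allowed = {"G", "F", "C"} if s == "Flx" else {s}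
--         m = 0
--         for i, e in enumerate(elig_sets):
--             if e & allowed:
--                 m |= 1 << i
--         masks.append(m)
--
--     uniq = []
--     for m in masks:
--         if m not in uniq:
--             uniq.append(m)
--
--     d = len(uniq)
--     for sub in range(1, 1 << d):
--         union = 0
--         demand = 0
--         for j in range(d):
--             if (sub >> j) & 1:
--                 union |= uniq[j]
--                 demand += masks.count(uniq[j])
--         if union.bit_count() < demand:
--             return False
--     return True
-- ===== Notes on version B (the rewrite author's own statement) =====
-- stated objective: alternative
-- what changed: Replaced A's memoized backtracking search over slot assignments by a search-free decision via Hall's marriage theorem: feasible iff every subset of distinct eligibility masks covers at least as many players as the slots demanding them.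
import Mathlib
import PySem

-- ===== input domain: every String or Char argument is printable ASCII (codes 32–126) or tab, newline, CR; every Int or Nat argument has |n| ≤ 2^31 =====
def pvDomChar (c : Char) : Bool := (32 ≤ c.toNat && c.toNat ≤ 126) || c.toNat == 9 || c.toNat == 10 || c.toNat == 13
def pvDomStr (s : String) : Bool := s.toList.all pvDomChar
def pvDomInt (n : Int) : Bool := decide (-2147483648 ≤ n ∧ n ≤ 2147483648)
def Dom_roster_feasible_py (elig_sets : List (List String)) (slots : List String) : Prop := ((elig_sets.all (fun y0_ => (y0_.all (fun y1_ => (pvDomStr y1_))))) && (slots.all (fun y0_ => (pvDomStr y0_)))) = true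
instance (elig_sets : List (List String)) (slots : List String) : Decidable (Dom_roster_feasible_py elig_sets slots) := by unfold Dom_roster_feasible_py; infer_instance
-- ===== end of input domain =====

-- B replaces A's memoized backtracking search by a search-free Hall's-criterion check over
-- the distinct slot-eligibility masks (alternative algorithm, same exact return value).

-- ===== PORT A =====

-- allowed = {"G","F","C"} if s == "Flx" else {s}
def pvAllowed (s : String) : List String := if s == "Flx" then ["G", "F", "C"] else [s]

-- the inner 'for i, elig in enumerate(elig_sets): if elig & allowed: mask |= 1 << i' loop
-- (identical source lines in A and in B, shared as one helper)
def pvSlotMask (elig_sets : List (List String)) (s : String) : Int :=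
  elig_sets.zipIdx.foldl
    (fun mask p =>
      if PySem.Set.inter p.1 (pvAllowed s) ≠ [] then PySem.Int.bor mask ((1 : Int) <<< (p.2 : Int))
      else mask)
    0

-- the 'for s in slots' loop of A with its early 'return False' on an empty mask
def pvBuildMasks (elig_sets : List (List String)) : List String → Option (List Int)
  | [] => some []
  | s :: rest =>
    let m := pvSlotMask elig_sets s
    if m = 0 then none
    else
      match pvBuildMasks elig_sets rest with
      | none => none
      | some ms => some (m :: ms)

-- 'available & -available' of a positive Python int, written in Nat (stated before pvTryBits,
-- which cites pvLsb_bounds to justify termination of the while loop)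
theorem pvBand_neg_self (a : Int) (h : 0 < a) :
    PySem.Int.band a (-a) = ((a.toNat - (a.toNat &&& (a.toNat - 1)) : Nat) : Int) := by
  unfold PySem.Int.band
  rw [if_pos (by omega), if_neg (by omega)]
  have h1 : (-(-a) - 1).toNat = a.toNat - 1 := by omega
  rw [h1]

theorem pvLsb_bounds (a : Int) (h : 0 < a) :
    0 < PySem.Int.band a (-a) ∧ PySem.Int.band a (-a) ≤ a := by
  rw [pvBand_neg_self a h]
  have h1 : a.toNat &&& (a.toNat - 1) ≤ a.toNat - 1 := Nat.and_le_right
  omega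

-- the 'while available:' loop of _can_fill; the '0 < avail' guard (rather than 'avail ≠ 0') only
-- makes the recursion total — A's loop variable is never negative
def pvTryBits (f : Int → Bool) (avail : Int) : Bool :=
  if h : 0 < avail then
    let lsb := PySem.Int.band avail (-avail)
    f lsb || pvTryBits f (avail - lsb)
  else false
termination_by avail.toNat
decreasing_by
  have hb := pvLsb_bounds avail h
  omega

-- _can_fill, recursing over the suffix of slot_masks (the lru_cache only caches values)
def pvCanFill : List Int → Int → Bool
  | [], _ => true
  | m :: rest, used =>
    pvTryBits (fun lsb => pvCanFill rest (PySem.Int.bor used lsb)) (PySem.Int.band m (Int.not used))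

def roster_feasible_py (elig_sets : List (List String)) (slots : List String) : Bool :=
  let n := elig_sets.length
  if slots.length > n then false
  else
    match pvBuildMasks elig_sets slots with
    | none => false
    | some slot_masks =>
      pvCanFill (PySem.List.sorted slot_masks (fun m => (PySem.Int.bitCount m : Int)) false) 0

-- ===== PORT B =====

def roster_feasible_py_alt (elig_sets : List (List String)) (slots : List String) : Bool :=
  let n := elig_sets.length
  if slots.length > n then false
  else
    let masks := slots.foldl (fun acc s => acc ++ [pvSlotMask elig_sets s]) []
    let uniq := masks.foldl (fun u m => if m ∈ u then u else u ++ [m]) []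
    let d := uniq.length
    (PySem.List.pyRange 1 ((1 : Int) <<< (d : Int)) 1).all fun sub =>
      let ud :=
        (PySem.List.pyRange 0 (d : Int) 1).foldl
          (fun ud j =>
            if PySem.Int.band (sub >>> j.toNat) 1 ≠ 0 then
              (PySem.Int.bor ud.1 (PySem.List.pyGetD uniq j 0),
                ud.2 + (PySem.List.count masks (PySem.List.pyGetD uniq j 0) : Int))
            else ud)
          ((0 : Int), (0 : Int))
      !decide ((PySem.Int.bitCount ud.1 : Int) < ud.2)

-- ===== PRECONDITION & SPEC =====
def Spec_roster_feasible_py (elig_sets : List (List String)) (slots : List String) (out : Bool) : Prop := out = roster_feasible_py_alt elig_sets slots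
instance (elig_sets : List (List String)) (slots : List String) (out : Bool) : Decidable (Spec_roster_feasible_py elig_sets slots out) := by unfold Spec_roster_feasible_py; infer_instance

-- ===== CLAIM (what is proved, stated in full; the proofs are below) =====
def Claim_equal_roster_feasible_py : Prop := ∀ (elig_sets : List (List String)) (slots : List String), Dom_roster_feasible_py elig_sets slots → Spec_roster_feasible_py elig_sets slots (roster_feasible_py elig_sets slots)

-- ===== LEMMAS AND PROOFS =====

-- ---- proof-layer vocabulary ----

-- "player set e can fill slot s"
def pvElig (e : List String) (s : String) : Bool := decide (PySem.Set.inter e (pvAllowed s) ≠ [])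

-- Nat shadow of pvSlotMask, processed head-first from bit position k
def pvFMask (s : String) : List (List String) → Nat → Nat → Nat
  | [], a, _ => a
  | e :: es, a, k => pvFMask s es (if pvElig e s then a ||| 2 ^ k else a) (k + 1)

def pvNatMask (elig_sets : List (List String)) (s : String) : Nat := pvFMask s elig_sets 0 0

-- recursive feasibility: distinct representative bits for the masks, avoiding the bits of u
def pvFeasR : List Nat → Nat → Prop
  | [], _ => True
  | m :: t, u => ∃ b, m.testBit b = true ∧ u.testBit b = false ∧ pvFeasR t (u ||| 2 ^ b)

-- the set of bit positions of a mask (every set bit t has 2^t ≤ m, so t ≤ m)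
def pvBits (m : Nat) : Finset Nat := (Finset.range (m + 1)).filter (fun i => m.testBit i)

-- ---- Nat bit lemmas ----

theorem pv_and_mod_two (x u : Nat) : (x &&& u) % 2 = 1 ↔ (x % 2 = 1 ∧ u % 2 = 1) := by
  have hb := Nat.testBit_and x u 0
  simp only [Nat.testBit_zero, ← Bool.decide_and] at hb
  exact decide_eq_decide.mp hb

theorem pv_testBit_sub_and (j : Nat) : ∀ (x u : Nat),
    (x - (x &&& u)).testBit j = (x.testBit j && !(u.testBit j)) := by
  induction j with
  | zero =>
    intro x u
    have hle : x &&& u ≤ x := Nat.and_le_left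
    have hb := pv_and_mod_two x u
    simp only [Nat.testBit_zero, ← decide_not, ← Bool.decide_and]
    rw [decide_eq_decide]
    omega
  | succ j ih =>
    intro x u
    have hle : x &&& u ≤ x := Nat.and_le_left
    have hd : (x &&& u) / 2 = x / 2 &&& u / 2 := Nat.and_div_two
    have hb := pv_and_mod_two x u
    have hdiv : (x - (x &&& u)) / 2 = x / 2 - (x / 2 &&& u / 2) := by
      rw [← hd]; omega
    rw [Nat.testBit_succ, hdiv, ih, ← Nat.testBit_succ, ← Nat.testBit_succ]

theorem pv_lowbit_spec : ∀ (m : Nat), 0 < m →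
    ∃ t, m &&& (m - 1) = m - 2 ^ t ∧ 2 ^ t ≤ m ∧ m.testBit t = true ∧
      ∀ j, (m &&& (m - 1)).testBit j = (m.testBit j && !decide (j = t)) := by
  intro m
  induction m using Nat.strong_induction_on with
  | _ m ih =>
    intro hm
    have hb := pv_and_mod_two m (m - 1)
    have hd : (m &&& (m - 1)) / 2 = m / 2 &&& (m - 1) / 2 := Nat.and_div_two
    rcases Nat.mod_two_eq_zero_or_one m with hpar | hpar
    · -- m even, with m / 2 > 0
      have ha : 0 < m / 2 := by omega
      obtain ⟨t', h1, h2, h3, h4⟩ := ih (m / 2) (by omega) ha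
      have hhalf : (m - 1) / 2 = m / 2 - 1 := by omega
      have hmod : (m &&& (m - 1)) % 2 = 0 := by omega
      have hval : m &&& (m - 1) = 2 * (m / 2 &&& (m / 2 - 1)) := by
        have := Nat.div_add_mod (m &&& (m - 1)) 2
        rw [hd, hhalf] at this; omega
      refine ⟨t' + 1, ?_, ?_, ?_, ?_⟩
      · rw [hval, h1, pow_succ]; omega
      · rw [pow_succ]; omega
      · rw [Nat.testBit_succ]; exact h3
      · intro j
        cases j with
        | zero => simp only [Nat.testBit_zero, hmod, hpar]; simp
        | succ j =>
          rw [Nat.testBit_succ, Nat.testBit_succ, hval,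
            Nat.mul_div_cancel_left _ (by norm_num : (0:Nat) < 2), h4 j]
          congr 1
          simp
    · -- m odd: m &&& (m-1) = m - 1, lowest bit 0
      have hval : m &&& (m - 1) = m - 1 := by
        apply Nat.eq_of_testBit_eq
        intro i
        cases i with
        | zero =>
          simp only [Nat.testBit_zero]
          rw [decide_eq_decide]; omega
        | succ i =>
          rw [Nat.testBit_succ, Nat.testBit_succ, hd]
          have hhalf : (m - 1) / 2 = m / 2 := by omega
          rw [hhalf, Nat.and_self]
      refine ⟨0, by simpa using hval, by simpa using hm, ?_, ?_⟩
      · simp only [Nat.testBit_zero]; simp [hpar]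
      · intro j
        rw [hval]
        cases j with
        | zero =>
          simp only [Nat.testBit_zero]
          have : (m - 1) % 2 = 0 := by omega
          simp [this, hpar]
        | succ j =>
          rw [Nat.testBit_succ, Nat.testBit_succ]
          have hhalf : (m - 1) / 2 = m / 2 := by omega
          rw [hhalf]
          simp

theorem pv_testBit_add_two_pow (j : Nat) : ∀ (A t : Nat), A.testBit t = false →
    (A + 2 ^ t).testBit j = (A.testBit j || decide (j = t)) := by
  induction j with
  | zero =>
    intro A t h
    cases t with
    | zero =>
      simp only [Nat.testBit_zero] at h ⊢
      rw [decide_eq_false_iff_not] at h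
      simp only [pow_zero]
      rw [Bool.or_comm]
      have : (A + 1) % 2 = 1 := by omega
      simp [this]
    | succ t =>
      simp only [Nat.testBit_zero]
      have h2 : 2 ^ (t + 1) % 2 = 0 := by
        rw [pow_succ]; omega
      have : (A + 2 ^ (t + 1)) % 2 = A % 2 := by omega
      simp [this]
  | succ j ih =>
    intro A t h
    cases t with
    | zero =>
      simp only [Nat.testBit_zero, decide_eq_false_iff_not] at h
      rw [Nat.testBit_succ, Nat.testBit_succ]
      have : (A + 2 ^ 0) / 2 = A / 2 := by simp only [pow_zero]; omega
      rw [this]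
      simp
    | succ t =>
      rw [Nat.testBit_succ, Nat.testBit_succ]
      have hdiv : (A + 2 ^ (t + 1)) / 2 = A / 2 + 2 ^ t := by
        rw [pow_succ]; omega
      rw [hdiv, ih (A / 2) t (by rw [Nat.testBit_div_two]; exact h)]
      congr 1
      simp

-- ---- bridges for PySem.Int bit operations ----

theorem pvInt_not_eq (n : Int) : Int.not n = -n - 1 := by
  cases n with
  | ofNat k => simp [Int.not, Int.negSucc_eq]; ring
  | negSucc k => simp [Int.not, Int.negSucc_eq]

theorem pvBand_not (a u : Nat) :
    PySem.Int.band (a : Int) (Int.not (u : Int)) = ((a - (a &&& u) : Nat) : Int) := by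
  unfold PySem.Int.band
  rw [pvInt_not_eq]
  rw [if_pos (by omega), if_neg (by omega)]
  have h1 : (-(-(u:Int) - 1) - 1).toNat = u := by omega
  rw [h1]
  simp

-- ---- the while loop explores exactly the set bits ----

theorem pvTryBits_spec (f : Int → Bool) : ∀ (m : Nat),
    (pvTryBits f (m : Int) = true ↔ ∃ t, m.testBit t = true ∧ f (((2 ^ t : Nat) : Int)) = true) := by
  intro m
  induction m using Nat.strong_induction_on with
  | _ m ih =>
    by_cases hm : 0 < m
    · obtain ⟨t0, h1, h2, h3, h4⟩ := pv_lowbit_spec m hm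
      have hP : 0 < 2 ^ t0 := Nat.two_pow_pos t0
      rw [pvTryBits]
      rw [dif_pos (by exact_mod_cast hm)]
      have hband : PySem.Int.band (m : Int) (-(m : Int)) = (((2 ^ t0 : Nat) : Int)) := by
        rw [pvBand_neg_self _ (by exact_mod_cast hm)]
        simp only [Int.toNat_natCast]
        have hn : m - (m &&& (m - 1)) = 2 ^ t0 := by omega
        rw [hn]
      have hsub : (m : Int) - (((2 ^ t0 : Nat) : Int)) = ((m &&& (m - 1) : Nat) : Int) := by
        rw [h1]; push_cast [h2]; ring
      have hlt : m &&& (m - 1) < m := by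
        have : m &&& (m - 1) ≤ m - 1 := Nat.and_le_right
        omega
      simp only [hband, hsub, Bool.or_eq_true, ih _ hlt]
      constructor
      · rintro (hf | ⟨t, ht, hf⟩)
        · exact ⟨t0, h3, hf⟩
        · rw [h4 t] at ht
          exact ⟨t, by simpa using And.left (by simpa using ht), hf⟩
      · rintro ⟨t, ht, hf⟩
        by_cases htt : t = t0
        · left; rw [← htt]; exact hf
        · right; exact ⟨t, by rw [h4 t]; simp [ht, htt], hf⟩
    · have hm0 : m = 0 := by omega
      subst hm0
      rw [pvTryBits]
      simp

-- ---- _can_fill decides pvFeasR ----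

theorem pvCanFill_spec : ∀ (ms : List Nat) (u : Nat),
    (pvCanFill (ms.map (fun x : Nat => (x : Int))) (u : Int) = true ↔ pvFeasR ms u) := by
  intro ms
  induction ms with
  | nil => intro u; simp [pvCanFill, pvFeasR]
  | cons m t ih =>
    intro u
    show pvTryBits _ (PySem.Int.band (m : Int) (Int.not (u : Int))) = true ↔ _
    rw [pvBand_not m u, pvTryBits_spec]
    unfold pvFeasR
    constructor
    · rintro ⟨b, hb, hf⟩
      rw [pv_testBit_sub_and] at hb
      simp only [Bool.and_eq_true, Bool.not_eq_true'] at hb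
      refine ⟨b, hb.1, hb.2, ?_⟩
      rw [PySem.Int.bor_natCast] at hf
      exact (ih _).mp hf
    · rintro ⟨b, hb1, hb2, hr⟩
      refine ⟨b, ?_, ?_⟩
      · rw [pv_testBit_sub_and]; simp [hb1, hb2]
      · rw [PySem.Int.bor_natCast]
        exact (ih _).mpr hr

-- ---- pvFeasR invariance ----

theorem pvFeasR_congr_or : ∀ (ms : List Nat) (u v : Nat), (∀ j, u.testBit j = v.testBit j) →
    (pvFeasR ms u ↔ pvFeasR ms v) := by
  intro ms
  induction ms with
  | nil => intro u v h; simp [pvFeasR]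
  | cons m t ih =>
    intro u v h
    unfold pvFeasR
    constructor <;> rintro ⟨b, h1, h2, hr⟩
    · exact ⟨b, h1, (h b) ▸ h2, (ih _ _ (fun j => by rw [Nat.testBit_or, Nat.testBit_or, h j])).mp hr⟩
    · exact ⟨b, h1, (h b).symm ▸ h2, (ih _ _ (fun j => by rw [Nat.testBit_or, Nat.testBit_or, h j])).mpr hr⟩

theorem pvFeasR_perm : ∀ {ms ms' : List Nat}, ms.Perm ms' → ∀ u, (pvFeasR ms u ↔ pvFeasR ms' u) := by
  intro ms ms' hp
  induction hp with
  | nil => intro u; rfl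
  | cons x _ ih =>
    intro u
    unfold pvFeasR
    exact exists_congr fun b => and_congr_right fun _ => and_congr_right fun _ => ih _
  | swap x y l =>
    intro u
    show (∃ b, y.testBit b = true ∧ _) ↔ _
    constructor <;>
    · rintro ⟨b1, h1, h2, b2, h3, h4, hr⟩
      rw [Nat.testBit_or] at h4
      simp only [Bool.or_eq_false_iff] at h4
      refine ⟨b2, h3, h4.1, b1, h1, ?_, ?_⟩
      · rw [Nat.testBit_or]
        have hne : b2 ≠ b1 := by
          intro hh; rw [hh] at h4
          rcases h4 with ⟨-, h4b⟩
          rw [Nat.testBit_two_pow] at h4b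
          simp at h4b
        simp only [Bool.or_eq_false_iff]
        refine ⟨h2, ?_⟩
        rw [Nat.testBit_two_pow]
        simpa using hne
      · refine (pvFeasR_congr_or l _ _ (fun j => by
          rw [Nat.lor_assoc, Nat.lor_assoc, Nat.lor_comm (2 ^ b1)])).mp hr
  | trans _ _ ih1 ih2 => intro u; exact (ih1 u).trans (ih2 u)

theorem pvFeasR_iff_picks : ∀ (ms : List Nat) (u : Nat),
    pvFeasR ms u ↔ ∃ picks : List Nat, List.Forall₂ (fun m b => m.testBit b = true) ms picks ∧
      picks.Nodup ∧ ∀ b ∈ picks, u.testBit b = false := by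
  intro ms
  induction ms with
  | nil =>
    intro u
    simp [pvFeasR]
  | cons m t ih =>
    intro u
    unfold pvFeasR
    constructor
    · rintro ⟨b, h1, h2, hr⟩
      obtain ⟨picks, hf, hnd, hav⟩ := (ih _).mp hr
      refine ⟨b :: picks, List.Forall₂.cons h1 hf, ?_, ?_⟩
      · rw [List.nodup_cons]
        refine ⟨fun hmem => ?_, hnd⟩
        have := hav b hmem
        rw [Nat.testBit_or, Nat.testBit_two_pow] at this
        simp at this
      · intro c hc
        rcases hc with _ | ⟨_, hc⟩
        · exact h2
        · have := hav c hc
          rw [Nat.testBit_or] at this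
          simp only [Bool.or_eq_false_iff] at this
          exact this.1
    · rintro ⟨picks, hf, hnd, hav⟩
      rcases hf with _ | ⟨h1, hf⟩
      rename_i b picks'
      rw [List.nodup_cons] at hnd
      refine ⟨b, h1, hav b (by simp), (ih _).mpr ⟨picks', hf, hnd.2, ?_⟩⟩
      intro c hc
      rw [Nat.testBit_or, Nat.testBit_two_pow]
      have h2 := hav c (by simp [hc])
      have : b ≠ c := fun hh => hnd.1 (hh ▸ hc)
      simp [h2, this]

theorem pvFeasR_zero_not : ∀ (ms : List Nat) (u : Nat), (0 : Nat) ∈ ms → ¬ pvFeasR ms u := by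
  intro ms
  induction ms with
  | nil => intro u h; simp at h
  | cons m t ih =>
    intro u hmem hf
    rcases hf with ⟨b, h1, h2, hr⟩
    rcases List.mem_cons.mp hmem with h | h
    · rw [← h] at h1; simp [Nat.zero_testBit] at h1
    · exact ih _ h hr

-- ---- the mask bridge ----

theorem pvFMask_fold (s : String) : ∀ (es : List (List String)) (a : Nat) (k : Nat),
    (es.zipIdx k).foldl
      (fun mask p =>
        if PySem.Set.inter p.1 (pvAllowed s) ≠ [] then PySem.Int.bor mask ((1 : Int) <<< (p.2 : Int))
        else mask)
      ((a : Nat) : Int) = ((pvFMask s es a k : Nat) : Int) := by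
  intro es
  induction es with
  | nil => intro a k; simp [pvFMask]
  | cons e es ih =>
    intro a k
    simp only [List.zipIdx_cons, List.foldl_cons]
    have hunf : pvFMask s (e :: es) a k
        = pvFMask s es (if pvElig e s then a ||| 2 ^ k else a) (k + 1) := rfl
    rw [hunf]
    by_cases he : PySem.Set.inter e (pvAllowed s) ≠ []
    · rw [if_pos he, if_pos (show pvElig e s = true by simp [pvElig, he])]
      have h1 : PySem.Int.bor ((a : Nat) : Int) ((1 : Int) <<< ((k : Nat) : Int))
          = (((a ||| 2 ^ k : Nat) : Nat) : Int) := by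
        rw [Int.one_shiftLeft, PySem.Int.bor_natCast]
      rw [h1, ih]
    · rw [if_neg he, if_neg (show ¬ pvElig e s = true by simp [pvElig]; simpa using he)]
      exact ih a (k + 1)

theorem pvSlotMask_eq (es : List (List String)) (s : String) :
    pvSlotMask es s = ((pvNatMask es s : Nat) : Int) := by
  have := pvFMask_fold s es 0 0
  simpa [pvSlotMask, pvNatMask] using this

-- ---- A's mask-building loop ----

theorem pvBuildMasks_eq (es : List (List String)) : ∀ (slots : List String),
    pvBuildMasks es slots =
      if (slots.map (pvNatMask es)).all (fun m => m ≠ 0)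
      then some ((slots.map (pvNatMask es)).map (fun m : Nat => (m : Int)))
      else none := by
  intro slots
  induction slots with
  | nil => simp [pvBuildMasks]
  | cons s rest ih =>
    have hunf : pvBuildMasks es (s :: rest)
        = (if pvSlotMask es s = 0 then none
           else match pvBuildMasks es rest with
                | none => none
                | some ms => some (pvSlotMask es s :: ms)) := rfl
    rw [hunf, pvSlotMask_eq, ih]
    by_cases h0 : pvNatMask es s = 0
    · simp [h0]
    · have h0' : ¬ ((pvNatMask es s : Int) = 0) := by simpa using h0
      by_cases hall : ((rest.map (pvNatMask es)).all (fun m => decide (m ≠ 0))) = true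
      · rw [if_neg h0', if_pos hall]
        simp only [List.map_cons, List.all_cons]
        rw [if_pos (by simp at hall ⊢; exact ⟨h0, hall⟩)]
      · rw [if_neg h0', if_neg hall]
        simp only [List.map_cons, List.all_cons]
        rw [if_neg (by simp at hall ⊢; intro _; exact hall)]

-- ---- A's top-level value ----

theorem pvA_iff (es : List (List String)) (slots : List String) :
    roster_feasible_py es slots = true ↔
      (slots.length ≤ es.length ∧ pvFeasR (slots.map (pvNatMask es)) 0) := by
  have hunf : roster_feasible_py es slots
      = (if slots.length > es.length then false
         else match pvBuildMasks es slots with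
              | none => false
              | some sm =>
                pvCanFill (PySem.List.sorted sm (fun m => (PySem.Int.bitCount m : Int)) false) 0) := rfl
  rw [hunf]
  by_cases hlen : slots.length > es.length
  · rw [if_pos hlen]
    simp
    intro h
    exact absurd h (by omega)
  · rw [if_neg hlen, pvBuildMasks_eq]
    by_cases hall : ((slots.map (pvNatMask es)).all (fun m => decide (m ≠ 0))) = true
    · rw [if_pos hall]
      set msN := slots.map (pvNatMask es) with hmsN
      set L := msN.map (fun m : Nat => (m : Int)) with hL
      set sortedL := PySem.List.sorted L (fun m => (PySem.Int.bitCount m : Int)) false with hS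
      have hperm : sortedL.Perm L := PySem.List.sorted_perm L _ false
      have hsorted_eq : sortedL = (sortedL.map Int.toNat).map (fun x : Nat => (x : Int)) := by
        rw [List.map_map]
        symm
        conv_rhs => rw [← List.map_id sortedL]
        apply List.map_congr_left
        intro x hx
        have hxL : x ∈ L := hperm.mem_iff.mp hx
        rw [hL] at hxL
        obtain ⟨n, -, rfl⟩ := List.mem_map.mp hxL
        simp
      have hpermN : (sortedL.map Int.toNat).Perm msN := by
        have h1 := hperm.map Int.toNat
        have h2 : L.map Int.toNat = msN := by
          rw [hL, List.map_map]
          conv_rhs => rw [← List.map_id msN]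
          apply List.map_congr_left
          intro x hx
          simp
        rw [h2] at h1
        exact h1
      show pvCanFill sortedL 0 = true ↔ _
      rw [show (0 : Int) = ((0 : Nat) : Int) from rfl]
      rw [hsorted_eq, pvCanFill_spec, pvFeasR_perm hpermN 0]
      have hlen' : slots.length ≤ es.length := by omega
      simp [hlen']
    · rw [if_neg hall]
      simp only [Bool.false_eq_true, false_iff]
      rintro ⟨-, hf⟩
      simp only [List.all_eq_true, decide_eq_true_eq, not_forall, exists_prop, ne_eq,
        not_not] at hall
      obtain ⟨m, hm, hm0⟩ := hall
      exact pvFeasR_zero_not _ 0 (by rw [← hm0]; exact hm) hf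


-- ---- bit-set / popcount bridges ----

theorem pv_testBit_le (m i : Nat) (h : m.testBit i = true) : 2 ^ i ≤ m := by
  by_contra hlt
  rw [Nat.testBit_lt_two_pow (by omega)] at h
  exact Bool.false_ne_true h

theorem pv_mem_pvBits (m i : Nat) : i ∈ pvBits m ↔ m.testBit i = true := by
  unfold pvBits
  rw [Finset.mem_filter, Finset.mem_range]
  constructor
  · rintro ⟨-, h⟩; exact h
  · intro h
    refine ⟨?_, h⟩
    have h1 := pv_testBit_le m i h
    have h2 : i < 2 ^ i := Nat.lt_two_pow_self
    omega

theorem pv_card_pvBits : ∀ (m : Nat), (pvBits m).card = ∑ i ∈ Finset.range (m + 1), (if m.testBit i then 1 else 0) := by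
  intro m
  rw [pvBits, Finset.card_filter]

theorem pv_bitCount_card : ∀ (m : Nat), PySem.Int.bitCount ((m : Nat) : Int) = (pvBits m).card := by
  intro m
  induction m using Nat.strong_induction_on with
  | _ m ih =>
    by_cases hm : m = 0
    · subst hm
      simp [pvBits, PySem.Int.bitCount_zero]
    · have h2 : m / 2 < m := by omega
      rw [PySem.Int.bitCount_natCast (by omega), ih _ h2]
      rw [pv_card_pvBits, pv_card_pvBits]
      conv_rhs => rw [Finset.sum_range_succ']
      simp only [Nat.testBit_succ]
      have hb0 : (if m.testBit 0 then (1:Nat) else 0) = m % 2 := by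
        rw [Nat.testBit_zero]
        rcases Nat.mod_two_eq_zero_or_one m with h | h <;> simp [h]
      rw [hb0]
      have hshrink : ∑ i ∈ Finset.range m, (if (m / 2).testBit i then (1:Nat) else 0)
          = ∑ i ∈ Finset.range (m / 2 + 1), (if (m / 2).testBit i then (1:Nat) else 0) := by
        symm
        apply Finset.sum_subset
        · intro x hx
          rw [Finset.mem_range] at hx ⊢
          omega
        · intro x hx hnx
          rw [Finset.mem_range] at hx
          rw [Finset.mem_range] at hnx
          have hxx : m / 2 < 2 ^ x := by
            have : x - 1 < 2 ^ (x - 1) := Nat.lt_two_pow_self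
            have hmono : (2:Nat) ^ (x - 1) ≤ 2 ^ x := Nat.pow_le_pow_right (by norm_num) (by omega)
            omega
          rw [Nat.testBit_lt_two_pow hxx]
          simp
      rw [hshrink]
      omega

theorem pv_sum_two_pow (d : Nat) : ∑ i ∈ Finset.range d, 2 ^ i = 2 ^ d - 1 := by
  induction d with
  | zero => simp
  | succ d ih =>
    rw [Finset.sum_range_succ, ih]
    have : (0:Nat) < 2 ^ d := Nat.two_pow_pos d
    rw [pow_succ]
    omega

-- ---- subset encodings ----

def pvEnc (T : Finset Nat) : Nat := ∑ j ∈ T, 2 ^ j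

theorem pv_testBit_enc (T : Finset Nat) : ∀ i, (pvEnc T).testBit i = decide (i ∈ T) := by
  induction T using Finset.induction_on with
  | empty => intro i; simp [pvEnc, Nat.zero_testBit]
  | insert a T ha ih =>
    intro i
    have henc : pvEnc (insert a T) = pvEnc T + 2 ^ a := by
      rw [pvEnc, Finset.sum_insert ha, pvEnc]; ring
    rw [henc, pv_testBit_add_two_pow i (pvEnc T) a (by rw [ih]; simpa using ha), ih]
    simp only [Finset.mem_insert]
    by_cases h1 : i ∈ T <;> by_cases h2 : i = a <;> simp [h1, h2]

theorem pvEnc_lt (T : Finset Nat) (d : Nat) (h : T ⊆ Finset.range d) : pvEnc T < 2 ^ d := by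
  have h1 : pvEnc T ≤ ∑ j ∈ Finset.range d, 2 ^ j := by
    apply Finset.sum_le_sum_of_subset h
  have h2 : (0:Nat) < 2 ^ d := Nat.two_pow_pos d
  rw [pv_sum_two_pow] at h1
  omega

theorem pvEnc_pos (T : Finset Nat) (h : T.Nonempty) : 1 ≤ pvEnc T := by
  obtain ⟨a, ha⟩ := h
  exact le_trans Nat.one_le_two_pow (Finset.single_le_sum (fun i _ => Nat.zero_le _) ha)

-- ---- multiplicity as a fiber count ----

theorem pv_count_sum : ∀ (l : List Nat) (v : Nat),
    l.count v = ∑ i ∈ Finset.range l.length, (if l.getD i 0 = v then 1 else 0) := by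
  intro l
  induction l with
  | nil => intro v; simp
  | cons x t ih =>
    intro v
    rw [List.count_cons, ih v]
    rw [List.length_cons, Finset.sum_range_succ']
    simp only [List.getD_cons_succ, List.getD_cons_zero]
    have : (if x = v then (1:Nat) else 0) = if (x == v) = true then 1 else 0 := by
      by_cases h : x = v <;> simp [h]
    omega

theorem pv_count_card (l : List Nat) (v : Nat) :
    l.count v = (Finset.univ.filter (fun p : Fin l.length => l.get p = v)).card := by
  have h1 : ∀ p : Fin l.length, (if l.get p = v then (1:Nat) else 0)
      = (fun i : Nat => if l.getD i 0 = v then (1:Nat) else 0) (↑p : Nat) := by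
    intro p
    have hg := List.getD_eq_getElem l 0 p.isLt
    simp [List.get_eq_getElem]
  rw [Finset.card_filter, Finset.sum_congr rfl (fun p _ => h1 p),
    Fin.sum_univ_eq_sum_range (fun i => if l.getD i 0 = v then (1:Nat) else 0)]
  exact pv_count_sum l v

-- ---- B's inner loop computes pvUD ----

def pvUD (uniqN msN : List Nat) (subN : Nat) : Nat → Nat × Nat
  | 0 => (0, 0)
  | d + 1 =>
    let p := pvUD uniqN msN subN d
    if subN.testBit d then (p.1 ||| uniqN.getD d 0, p.2 + msN.count (uniqN.getD d 0)) else p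

theorem pv_getD_map (l : List Nat) (i : Nat) :
    (l.map (fun x : Nat => (x : Int))).getD i 0 = ((l.getD i 0 : Nat) : Int) := by
  rcases h : l[i]? with _ | x
  · rw [List.getD, List.getD, List.getElem?_map, h]
    simp
  · rw [List.getD, List.getD, List.getElem?_map, h]
    simp

theorem pv_cond_testBit (subN j : Nat) :
    (PySem.Int.band ((subN : Int) >>> ((j : Nat) : Int)) 1 ≠ 0) ↔ subN.testBit j = true := by
  rw [Int.shiftRight_natCast]
  rw [show (1 : Int) = ((1 : Nat) : Int) from rfl, PySem.Int.band_natCast]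
  rw [Nat.and_one_is_mod]
  have ht : subN.testBit j = (subN >>> j).testBit 0 := by
    rw [Nat.testBit_shiftRight]
    simp
  rw [ht, Nat.testBit_zero]
  constructor
  · intro h
    have h0 : ((subN >>> j) % 2 : Nat) ≠ 0 := by
      intro hh
      apply h
      rw [hh]
      rfl
    simp only [decide_eq_true_eq]
    omega
  · intro h hh
    simp only [decide_eq_true_eq] at h
    have h0 : ((subN >>> j) % 2 : Nat) = 0 := by exact_mod_cast hh
    omega

theorem pvB_fold (uniqN msN : List Nat) (subN : Nat) : ∀ (d : Nat),
    (PySem.List.pyRange 0 (d : Int) 1).foldl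
      (fun (ud : Int × Int) j =>
        if PySem.Int.band (((subN : Nat) : Int) >>> j.toNat) 1 ≠ 0 then
          (PySem.Int.bor ud.1 (PySem.List.pyGetD (uniqN.map (fun x : Nat => (x : Int))) j 0),
            ud.2 + (PySem.List.count (msN.map (fun x : Nat => (x : Int))) (PySem.List.pyGetD (uniqN.map (fun x : Nat => (x : Int))) j 0) : Int))
        else ud)
      ((0 : Int), (0 : Int))
    = (((pvUD uniqN msN subN d).1 : Int), ((pvUD uniqN msN subN d).2 : Int)) := by
  intro d
  induction d with
  | zero => simp [pvUD]
  | succ d ih =>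
    have hsplit : PySem.List.pyRange 0 ((d + 1 : Nat) : Int) 1
        = PySem.List.pyRange 0 (d : Int) 1 ++ [(d : Int)] := by
      have := PySem.List.pyRange_one_succ_right (a := 0) (b := (d : Int)) (by positivity)
      simpa using this
    rw [hsplit, List.foldl_append, ih]
    simp only [List.foldl_cons, List.foldl_nil, Int.toNat_natCast]
    have hget : PySem.List.pyGetD (uniqN.map (fun x : Nat => (x : Int))) ((d : Nat) : Int) 0
        = ((uniqN.getD d 0 : Nat) : Int) := by
      rw [PySem.List.pyGetD_natCast, pv_getD_map]
    have hcount : PySem.List.count (msN.map (fun x : Nat => (x : Int))) ((uniqN.getD d 0 : Nat) : Int)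
        = msN.count (uniqN.getD d 0) := by
      rw [PySem.List.count_eq]
      exact List.count_map_of_injective msN _ (Nat.cast_injective (R := Int)) _
    have hup : pvUD uniqN msN subN (d + 1)
        = (if subN.testBit d
           then ((pvUD uniqN msN subN d).1 ||| uniqN.getD d 0,
                 (pvUD uniqN msN subN d).2 + msN.count (uniqN.getD d 0))
           else pvUD uniqN msN subN d) := rfl
    by_cases hb : subN.testBit d
    · rw [if_pos ((pv_cond_testBit subN d).mpr hb)]
      rw [hup, if_pos hb]
      rw [hget, hcount, PySem.Int.bor_natCast]
      simp
    · rw [if_neg (fun hc => by rw [pv_cond_testBit subN d] at hc; simp [hb] at hc)]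
      rw [hup, if_neg hb]

theorem pvBits_or (a b : Nat) : pvBits (a ||| b) = pvBits a ∪ pvBits b := by
  ext i
  simp only [pv_mem_pvBits, Finset.mem_union, Nat.testBit_or, Bool.or_eq_true]

theorem pvBits_zero : pvBits 0 = ∅ := by
  ext i
  simp [pv_mem_pvBits, Nat.zero_testBit]

theorem pvUD_spec (uniqN msN : List Nat) (subN : Nat) : ∀ d : Nat,
    pvBits (pvUD uniqN msN subN d).1
        = ((Finset.range d).filter (fun j => subN.testBit j)).biUnion (fun j => pvBits (uniqN.getD j 0))
    ∧ (pvUD uniqN msN subN d).2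
        = ∑ j ∈ (Finset.range d).filter (fun j => subN.testBit j), msN.count (uniqN.getD j 0) := by
  intro d
  induction d with
  | zero => simp [pvUD, pvBits_zero]
  | succ d ih =>
    have hup : pvUD uniqN msN subN (d + 1)
        = (if subN.testBit d
           then ((pvUD uniqN msN subN d).1 ||| uniqN.getD d 0,
                 (pvUD uniqN msN subN d).2 + msN.count (uniqN.getD d 0))
           else pvUD uniqN msN subN d) := rfl
    have hrange : Finset.range (d + 1) = insert d (Finset.range d) := Finset.range_add_one
    by_cases hb : subN.testBit d
    · rw [hup, if_pos hb]
      have hfilter : (Finset.range (d+1)).filter (fun j => subN.testBit j)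
          = insert d ((Finset.range d).filter (fun j => subN.testBit j)) := by
        rw [hrange, Finset.filter_insert, if_pos hb]
      rw [hfilter]
      constructor
      · show pvBits ((pvUD uniqN msN subN d).1 ||| uniqN.getD d 0) = _
        rw [pvBits_or, ih.1, Finset.biUnion_insert]
        rw [Finset.union_comm]
      · show (pvUD uniqN msN subN d).2 + msN.count (uniqN.getD d 0) = _
        rw [Finset.sum_insert (by simp), ih.2]
        ring
    · rw [hup, if_neg hb]
      have hfilter : (Finset.range (d+1)).filter (fun j => subN.testBit j)
          = (Finset.range d).filter (fun j => subN.testBit j) := by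
        rw [hrange, Finset.filter_insert, if_neg hb]
      rw [hfilter]
      exact ih

-- ---- Hall's condition, in three shapes ----

def pvHallT (msN : List Nat) : Prop :=
  ∀ T : Finset Nat, T ⊆ Finset.range (PySem.Set.ofList msN).length →
    (∑ j ∈ T, msN.count ((PySem.Set.ofList msN).getD j 0))
      ≤ (T.biUnion (fun j => pvBits ((PySem.Set.ofList msN).getD j 0))).card

def pvHallK (msN : List Nat) : Prop :=
  ∀ S : Finset (Fin msN.length), S.card ≤ (S.biUnion (fun p => pvBits (msN.get p))).card

def pvHallB (msN : List Nat) : Prop :=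
  ∀ subN : Nat, 1 ≤ subN → subN < 2 ^ (PySem.Set.ofList msN).length →
    (pvUD (PySem.Set.ofList msN) msN subN (PySem.Set.ofList msN).length).2
      ≤ (pvBits (pvUD (PySem.Set.ofList msN) msN subN (PySem.Set.ofList msN).length).1).card

theorem pvHallB_iff_T (msN : List Nat) : pvHallB msN ↔ pvHallT msN := by
  set uniqN := PySem.Set.ofList msN with hU
  set d := uniqN.length with hd
  constructor
  · intro hB T hsub
    rcases T.eq_empty_or_nonempty with rfl | hne
    · simp
    · have h1 := pvEnc_pos T hne
      have h2 := pvEnc_lt T d hsub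
      have hTeq : (Finset.range d).filter (fun j => (pvEnc T).testBit j) = T := by
        ext j
        rw [Finset.mem_filter, Finset.mem_range, pv_testBit_enc]
        constructor
        · rintro ⟨-, h⟩; simpa using h
        · intro h; exact ⟨Finset.mem_range.mp (hsub h), by simpa using h⟩
      have := hB (pvEnc T) h1 h2
      rw [(pvUD_spec uniqN msN (pvEnc T) d).1, (pvUD_spec uniqN msN (pvEnc T) d).2, hTeq] at this
      exact this
  · intro hT subN h1 h2
    rw [(pvUD_spec uniqN msN subN d).1, (pvUD_spec uniqN msN subN d).2]
    exact hT _ (Finset.filter_subset _ _)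

theorem pvPosIdx_lt (msN : List Nat) (p : Fin msN.length) :
    (PySem.Set.ofList msN).idxOf (msN.get p) < (PySem.Set.ofList msN).length :=
  List.idxOf_lt_length_of_mem ((PySem.Set.mem_ofList _ _).mpr (msN.get_mem p))

theorem pvPosIdx_get (msN : List Nat) (p : Fin msN.length) :
    (PySem.Set.ofList msN).getD ((PySem.Set.ofList msN).idxOf (msN.get p)) 0 = msN.get p := by
  rw [List.getD_eq_getElem _ _ (pvPosIdx_lt msN p)]
  exact List.getElem_idxOf (pvPosIdx_lt msN p)

theorem pvPosIdx_eq_iff (msN : List Nat) (p : Fin msN.length) (j : Nat)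
    (hj : j < (PySem.Set.ofList msN).length) :
    (PySem.Set.ofList msN).idxOf (msN.get p) = j ↔ msN.get p = (PySem.Set.ofList msN).getD j 0 := by
  constructor
  · intro h
    rw [← h, pvPosIdx_get]
  · intro h
    rw [List.getD_eq_getElem _ _ hj] at h
    rw [h]
    exact (PySem.Set.nodup_ofList msN).idxOf_getElem j hj

theorem pvHallT_iff_K (msN : List Nat) : pvHallT msN ↔ pvHallK msN := by
  set uniqN := PySem.Set.ofList msN with hU
  set d := uniqN.length with hd
  have hidx := pvPosIdx_lt msN
  have hget := pvPosIdx_get msN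
  constructor
  · intro hT S
    set T : Finset Nat := S.image (fun p => uniqN.idxOf (msN.get p)) with hT'
    have hsub : T ⊆ Finset.range d := by
      intro j hj
      rw [hT', Finset.mem_image] at hj
      obtain ⟨p, -, rfl⟩ := hj
      rw [Finset.mem_range]
      exact hidx p
    have hcard : S.card ≤ ∑ j ∈ T, msN.count (uniqN.getD j 0) := by
      rw [Finset.card_eq_sum_card_fiberwise
        (f := fun p => uniqN.idxOf (msN.get p)) (t := T)
        (fun p hp => Finset.mem_image_of_mem _ hp)]
      apply Finset.sum_le_sum
      intro j hj
      rw [pv_count_card]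
      apply Finset.card_le_card
      intro p hp
      rw [Finset.mem_filter] at hp ⊢
      refine ⟨Finset.mem_univ p, ?_⟩
      have hjlt : j < d := Finset.mem_range.mp (hsub hj)
      exact (pvPosIdx_eq_iff msN p j hjlt).mp hp.2
    have hbi : T.biUnion (fun j => pvBits (uniqN.getD j 0))
        = S.biUnion (fun p => pvBits (msN.get p)) := by
      rw [hT', Finset.image_biUnion]
      apply Finset.biUnion_congr rfl
      intro p _
      rw [hget]
    calc S.card ≤ ∑ j ∈ T, msN.count (uniqN.getD j 0) := hcard
      _ ≤ (T.biUnion (fun j => pvBits (uniqN.getD j 0))).card := hT T hsub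
      _ = _ := by rw [hbi]
  · intro hK T hsub
    set S : Finset (Fin msN.length) := Finset.univ.filter (fun p => uniqN.idxOf (msN.get p) ∈ T) with hS
    have hfib := Finset.card_eq_sum_card_fiberwise
        (f := fun p => uniqN.idxOf (msN.get p)) (t := T) (s := S)
        (fun p hp => (Finset.mem_filter.mp hp).2)
    have hdemand : ∑ j ∈ T, msN.count (uniqN.getD j 0) = S.card := by
      rw [hfib]
      apply Finset.sum_congr rfl
      intro j hj
      have hjlt : j < d := Finset.mem_range.mp (hsub hj)
      rw [pv_count_card]
      congr 1
      ext p
      rw [Finset.mem_filter, Finset.mem_filter, hS, Finset.mem_filter]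
      constructor
      · rintro ⟨-, h2⟩
        refine ⟨⟨Finset.mem_univ p, ?_⟩, ?_⟩
        · rw [(pvPosIdx_eq_iff msN p j hjlt).mpr h2]; exact hj
        · exact (pvPosIdx_eq_iff msN p j hjlt).mpr h2
      · rintro ⟨-, h2⟩
        exact ⟨Finset.mem_univ p, (pvPosIdx_eq_iff msN p j hjlt).mp h2⟩
    have hbi : S.biUnion (fun p => pvBits (msN.get p)) ⊆ T.biUnion (fun j => pvBits (uniqN.getD j 0)) := by
      intro i hi
      rw [Finset.mem_biUnion] at hi ⊢
      obtain ⟨p, hp, hip⟩ := hi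
      refine ⟨uniqN.idxOf (msN.get p), (Finset.mem_filter.mp hp).2, ?_⟩
      rw [hget]
      exact hip
    calc ∑ j ∈ T, msN.count (uniqN.getD j 0) = S.card := hdemand
      _ ≤ (S.biUnion (fun p => pvBits (msN.get p))).card := hK S
      _ ≤ _ := Finset.card_le_card hbi

theorem pvHallK_iff_feas (msN : List Nat) : pvHallK msN ↔ pvFeasR msN 0 := by
  rw [pvHallK, Finset.all_card_le_biUnion_card_iff_exists_injective
    (t := fun p : Fin msN.length => pvBits (msN.get p))]
  rw [pvFeasR_iff_picks]
  constructor
  · rintro ⟨f, hinj, hmem⟩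
    refine ⟨List.ofFn f, ?_, ?_, ?_⟩
    · rw [List.forall₂_iff_get]
      refine ⟨by simp, ?_⟩
      intro i h1 h2
      rw [List.get_ofFn]
      have := hmem ⟨i, h1⟩
      rw [pv_mem_pvBits] at this
      convert this using 2
    · exact List.nodup_ofFn.mpr hinj
    · intro b _
      rw [Nat.zero_testBit]
  · rintro ⟨picks, hf, hnd, -⟩
    have hlen : msN.length = picks.length := List.Forall₂.length_eq hf
    refine ⟨fun p => picks.get (Fin.cast hlen p), ?_, ?_⟩
    · intro p q hpq
      have h2 := (List.nodup_iff_injective_get.mp hnd) hpq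
      exact Fin.cast_injective hlen h2
    · intro p
      rw [pv_mem_pvBits]
      rw [List.forall₂_iff_get] at hf
      have h3 := hf.2 p.1 p.isLt (by rw [← hlen]; exact p.isLt)
      simpa using h3

-- ---- B's dedup loop is PySem.Set.ofList, commuting with the Nat→Int cast ----

theorem pvDedup_eq_ofList (l : List Nat) :
    l.foldl (fun u m => if m ∈ u then u else u ++ [m]) [] = PySem.Set.ofList l := by
  rw [PySem.Set.ofList_eq_foldl]
  apply PySem.List.foldl_congr_mem
  intro acc x _
  rw [PySem.Set.add_eq_ite]

theorem pvDedup_cast : ∀ (l : List Nat) (acc : List Nat),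
    ((l.map (fun x : Nat => (x : Int))).foldl (fun u m => if m ∈ u then u else u ++ [m])
        (acc.map (fun x : Nat => (x : Int))))
      = (l.foldl (fun u m => if m ∈ u then u else u ++ [m]) acc).map (fun x : Nat => (x : Int)) := by
  intro l
  induction l with
  | nil => intro acc; rfl
  | cons x t ih =>
    intro acc
    rw [List.map_cons, List.foldl_cons, List.foldl_cons]
    by_cases hmem : x ∈ acc
    · rw [if_pos (List.mem_map_of_mem hmem), if_pos hmem]
      exact ih acc
    · rw [if_neg (fun hc => hmem ((List.mem_map_of_injective (Nat.cast_injective (R := Int))).mp hc)),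
        if_neg hmem]
      rw [show (acc.map (fun x : Nat => (x : Int))) ++ [((x : Nat) : Int)]
          = (acc ++ [x]).map (fun x : Nat => (x : Int)) by rw [List.map_append]; rfl]
      exact ih (acc ++ [x])

-- ---- B's top-level value ----

theorem pvB_iff (es : List (List String)) (slots : List String) :
    roster_feasible_py_alt es slots = true ↔
      (slots.length ≤ es.length ∧ pvFeasR (slots.map (pvNatMask es)) 0) := by
  by_cases hlen : slots.length > es.length
  · have hunf : roster_feasible_py_alt es slots = false := by
      show (if slots.length > es.length then false else _) = false
      rw [if_pos hlen]
    rw [hunf]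
    simp
    intro h
    exact absurd h (by omega)
  · set msN := slots.map (pvNatMask es) with hmsN
    set uniqN := PySem.Set.ofList msN with hUN
    set D := uniqN.length with hD
    have hmasks : slots.foldl (fun acc s => acc ++ [pvSlotMask es s]) []
        = msN.map (fun x : Nat => (x : Int)) := by
      rw [PySem.List.foldl_append_singleton_eq_map, List.nil_append, hmsN, List.map_map]
      apply List.map_congr_left
      intro s _
      exact pvSlotMask_eq es s
    have huniq : (msN.map (fun x : Nat => (x : Int))).foldl
          (fun u m => if m ∈ u then u else u ++ [m]) []
        = uniqN.map (fun x : Nat => (x : Int)) := by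
      have h1 := pvDedup_cast msN []
      rw [List.map_nil] at h1
      rw [h1, pvDedup_eq_ofList]
    have hunf : roster_feasible_py_alt es slots
        = ((PySem.List.pyRange 1
              ((1 : Int) <<< ((((uniqN.map (fun x : Nat => (x : Int))).length : Nat)) : Int)) 1).all
            fun sub =>
              let ud :=
                (PySem.List.pyRange 0 ((((uniqN.map (fun x : Nat => (x : Int))).length : Nat)) : Int) 1).foldl
                  (fun ud j =>
                    if PySem.Int.band (sub >>> j.toNat) 1 ≠ 0 then
                      (PySem.Int.bor ud.1 (PySem.List.pyGetD (uniqN.map (fun x : Nat => (x : Int))) j 0),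
                        ud.2 + (PySem.List.count (msN.map (fun x : Nat => (x : Int))) (PySem.List.pyGetD (uniqN.map (fun x : Nat => (x : Int))) j 0) : Int))
                    else ud)
                  ((0 : Int), (0 : Int))
              !decide ((PySem.Int.bitCount ud.1 : Int) < ud.2)) := by
      show (if slots.length > es.length then false else _) = _
      rw [if_neg hlen, hmasks, huniq]
    rw [hunf, List.length_map]
    have hshift : ((1 : Int) <<< (((D : Nat)) : Int)) = (((2 ^ D : Nat) : Nat) : Int) :=
      Int.one_shiftLeft D
    rw [hshift, List.all_eq_true]
    have hcheck : ∀ subN : Nat,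
        ((let ud :=
            (PySem.List.pyRange 0 (((D : Nat)) : Int) 1).foldl
              (fun ud j =>
                if PySem.Int.band ((((subN : Nat) : Int)) >>> j.toNat) 1 ≠ 0 then
                  (PySem.Int.bor ud.1 (PySem.List.pyGetD (uniqN.map (fun x : Nat => (x : Int))) j 0),
                    ud.2 + (PySem.List.count (msN.map (fun x : Nat => (x : Int))) (PySem.List.pyGetD (uniqN.map (fun x : Nat => (x : Int))) j 0) : Int))
                else ud)
              ((0 : Int), (0 : Int))
          !decide ((PySem.Int.bitCount ud.1 : Int) < ud.2)) = true)
        ↔ ((pvUD uniqN msN subN D).2 ≤ (pvBits (pvUD uniqN msN subN D).1).card) := by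
      intro subN
      rw [pvB_fold uniqN msN subN D]
      simp only []
      rw [Bool.not_eq_true', decide_eq_false_iff_not, not_lt, pv_bitCount_card]
      constructor
      · intro h; exact_mod_cast h
      · intro h; exact_mod_cast h
    constructor
    · intro hall
      refine ⟨by omega, ?_⟩
      rw [← pvHallK_iff_feas, ← pvHallT_iff_K, ← pvHallB_iff_T]
      intro subN h1 h2
      have hmem : ((subN : Nat) : Int) ∈ PySem.List.pyRange 1 (((2 ^ D : Nat) : Nat) : Int) 1 := by
        rw [PySem.List.mem_pyRange_one]
        constructor
        · exact_mod_cast h1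
        · exact_mod_cast h2
      exact (hcheck subN).mp (hall _ hmem)
    · rintro ⟨hk, hf⟩
      intro sub hmem
      rw [PySem.List.mem_pyRange_one] at hmem
      obtain ⟨hs1, hs2⟩ := hmem
      have hsub : sub = ((sub.toNat : Nat) : Int) := by omega
      rw [hsub]
      apply (hcheck sub.toNat).mpr
      have hB : pvHallB msN := by
        rw [pvHallB_iff_T, pvHallT_iff_K, pvHallK_iff_feas]
        exact hf
      apply hB
      · omega
      · have : (sub.toNat : Int) < ((2 ^ D : Nat) : Int) := by rw [← hsub]; exact hs2
        exact_mod_cast this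

-- ===== VERDICT (by name: the statement is the Claim_ definition above) =====
theorem roster_feasible_py_spec : Claim_equal_roster_feasible_py := by
  intro es slots _
  show roster_feasible_py es slots = roster_feasible_py_alt es slots
  rw [Bool.eq_iff_iff, pvA_iff, pvB_iff]
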